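-- pv_equiv track=rewrite | github.com/Khaniixx/companion-os | services/agent-runtime/app/skills/micro_utilities.py | _parse_todo_request
-- ===== SOURCE A (Python) =====
-- def _parse_todo_request(request_text: str) -> str | None:
--     lowered_request = request_text.lower()
--
--     for prefix in ("add todo ", "add to-do ", "create todo ", "create to-do "):
--         if lowered_request.startswith(prefix):
--             todo_text = request_text[len(prefix) :].strip()
--             if not todo_text:
--                 raise ValueError("To-do text cannot be empty.")
--             return todo_text
--
--     for prefix in ("add a todo ", "add a to-do ", "create a todo ", "create a to-do "):
--         if lowered_request.startswith(prefix):
--             todo_text = request_text[len(prefix) :].strip()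
--             if not todo_text:
--                 raise ValueError("To-do text cannot be empty.")
--             return todo_text
--
--     for action_prefix in ("add ", "create "):
--         if not lowered_request.startswith(action_prefix):
--             continue
--
--         todo_body = request_text[len(action_prefix) :].strip()
--         lowered_body = todo_body.lower()
--         for suffix in (" to my todo list", " to my to-do list", " on my todo list", " on my to-do list"):
--             if lowered_body.endswith(suffix):
--                 todo_text = todo_body[: -len(suffix)].strip()
--                 if not todo_text:
--                     raise ValueError("To-do text cannot be empty.")
--                 return todo_text
--
--         for suffix in (" to todo list", " to to-do list", " on todo list", " on to-do list"):
--             if lowered_body.endswith(suffix):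
--                 todo_text = todo_body[: -len(suffix)].strip()
--                 if not todo_text:
--                     raise ValueError("To-do text cannot be empty.")
--                 return todo_text
--
--     return None
-- ===== SOURCE B (Python) =====
-- def _parse_todo_request(request_text: str) -> str | None:
--     low = request_text.lower()
--
--     for action in ("add ", "create "):
--         if not low.startswith(action):
--             continue
--
--         # Prefix form: action + optional "a " + "todo "/"to-do " + text.
--         offset = len(action)
--         rest = low[offset:]
--         if rest.startswith("a "):
--             offset += 2
--             rest = rest[2:]
--         for marker in ("todo ", "to-do "):
--             if rest.startswith(marker):
--                 todo_text = request_text[offset + len(marker):].strip()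
--                 if not todo_text:
--                     raise ValueError("To-do text cannot be empty.")
--                 return todo_text
--
--         # Suffix form: action + text + connector + " todo list"/" to-do list".
--         body = request_text[len(action):].strip()
--         lowered_body = body.lower()
--         for marker in (" todo list", " to-do list"):
--             if not lowered_body.endswith(marker):
--                 continue
--             mid = body[: -len(marker)]
--             lowered_mid = lowered_body[: -len(marker)]
--             for connector in (" to my", " on my", " to", " on"):
--                 if lowered_mid.endswith(connector):
--                     todo_text = mid[: -len(connector)].strip()
--                     if not todo_text:
--                         raise ValueError("To-do text cannot be empty.")
--                     return todo_text
--         return None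
--
--     return None
-- ===== Notes on version B (the rewrite author's own statement) =====
-- stated objective: idiomatic
-- what changed: A scans 16 hard-coded whole prefix/suffix literals in three flat loops; B instead parses the request compositionally inside a single action loop: action word, optional article and todo-marker for the prefix form, then todo-list marker plus connector for the suffix form.
import Mathlib
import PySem

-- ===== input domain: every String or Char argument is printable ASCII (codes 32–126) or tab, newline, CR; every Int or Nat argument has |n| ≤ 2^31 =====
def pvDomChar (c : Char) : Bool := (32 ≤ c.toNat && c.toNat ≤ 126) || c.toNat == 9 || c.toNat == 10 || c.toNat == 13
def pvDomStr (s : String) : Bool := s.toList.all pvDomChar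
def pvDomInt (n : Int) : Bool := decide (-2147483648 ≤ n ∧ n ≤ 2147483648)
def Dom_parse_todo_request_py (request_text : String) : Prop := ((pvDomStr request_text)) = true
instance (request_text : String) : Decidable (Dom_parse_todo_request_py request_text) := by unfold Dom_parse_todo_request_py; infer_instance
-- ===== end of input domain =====

-- B re-groups A's 16 hard-coded prefix/suffix literals into a compositional scan
-- (action + optional "a " + marker; marker + connector), for idiomatic clarity; return
-- value only (no observable mutation in either program).

-- Outcome of one scan of A's/B's loops: fell through / raised ValueError / returned a value.
inductive PvRes where
  | fall
  | raised
  | ret : Option (List Char) → PvRes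

-- ===== PORT A =====
-- one `for prefix in (…)` loop of A: first prefix of `low`, return the stripped remainder
def pvA_prefixes (R low : List Char) : List (List Char) → PvRes
  | [] => .fall
  | p :: ps =>
    if PySem.Chars.startswith low p then
      let t := PySem.Chars.strip (PySem.Chars.slice R (some (p.length : Int)) none)
      if t = [] then .raised else .ret (some t)
    else pvA_prefixes R low ps

-- one `for suffix in (…)` loop of A
def pvA_suffixes (body lb : List Char) : List (List Char) → PvRes
  | [] => .fall
  | s :: ss =>
    if PySem.Chars.endswith lb s then
      let t := PySem.Chars.strip (PySem.Chars.slice body none (some (-(s.length : Int))))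
      if t = [] then .raised else .ret (some t)
    else pvA_suffixes body lb ss

-- A's two suffix loops, run in sequence
def pvA_suffixStage (body lb : List Char) : PvRes :=
  match pvA_suffixes body lb [" to my todo list".toList, " to my to-do list".toList, " on my todo list".toList, " on my to-do list".toList] with
  | .fall => pvA_suffixes body lb [" to todo list".toList, " to to-do list".toList, " on todo list".toList, " on to-do list".toList]
  | r => r

-- A's `for action_prefix in ("add ", "create ")` loop (with `continue`)
def pvA_actions (R low : List Char) : List (List Char) → PvRes
  | [] => .fall
  | a :: as =>
    if PySem.Chars.startswith low a then
      let body := PySem.Chars.strip (PySem.Chars.slice R (some (a.length : Int)) none)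
      match pvA_suffixStage body (PySem.Chars.lower body) with
      | .fall => pvA_actions R low as
      | r => r
    else pvA_actions R low as

def parse_todo_request_py (request_text : String) : Option String :=
  let R := request_text.toList
  let low := PySem.Chars.lower R          -- lowered_request = request_text.lower()
  match pvA_prefixes R low ["add todo ".toList, "add to-do ".toList, "create todo ".toList, "create to-do ".toList] with
  | .ret v => v.map String.ofList
  | .raised => none                        -- ValueError (excluded by Pre_)
  | .fall =>
    match pvA_prefixes R low ["add a todo ".toList, "add a to-do ".toList, "create a todo ".toList, "create a to-do ".toList] with
    | .ret v => v.map String.ofList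
    | .raised => none                      -- ValueError (excluded by Pre_)
    | .fall =>
      match pvA_actions R low ["add ".toList, "create ".toList] with
      | .ret v => v.map String.ofList
      | .raised => none                    -- ValueError (excluded by Pre_)
      | .fall => none                      -- `return None`

-- ===== PORT B =====
-- B's `for marker in ("todo ", "to-do ")` prefix-marker loop
def pvB_markers (R : List Char) (offset : Int) (rest : List Char) : List (List Char) → PvRes
  | [] => .fall
  | m :: ms =>
    if PySem.Chars.startswith rest m then
      let t := PySem.Chars.strip (PySem.Chars.slice R (some (offset + (m.length : Int))) none)
      if t = [] then .raised else .ret (some t)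
    else pvB_markers R offset rest ms

-- B's `for connector in (…)` loop
def pvB_connectors (mid lm : List Char) : List (List Char) → PvRes
  | [] => .fall
  | c :: cs =>
    if PySem.Chars.endswith lm c then
      let t := PySem.Chars.strip (PySem.Chars.slice mid none (some (-(c.length : Int))))
      if t = [] then .raised else .ret (some t)
    else pvB_connectors mid lm cs

-- B's `for marker in (" todo list", " to-do list")` suffix-marker loop (with `continue`)
def pvB_suffixMarkers (body lb : List Char) : List (List Char) → PvRes
  | [] => .fall
  | m :: ms =>
    if PySem.Chars.endswith lb m then
      match pvB_connectors (PySem.Chars.slice body none (some (-(m.length : Int)))) (PySem.Chars.slice lb none (some (-(m.length : Int)))) [" to my".toList, " on my".toList, " to".toList, " on".toList] with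
      | .fall => pvB_suffixMarkers body lb ms
      | r => r
    else pvB_suffixMarkers body lb ms

-- B's `for action in ("add ", "create ")` loop
def pvB_actions (R low : List Char) : List (List Char) → PvRes
  | [] => .fall
  | a :: as =>
    if PySem.Chars.startswith low a then
      let rest := PySem.Chars.slice low (some (a.length : Int)) none
      let or2 := if PySem.Chars.startswith rest "a ".toList
                 then ((a.length : Int) + 2, PySem.Chars.slice rest (some 2) none)
                 else ((a.length : Int), rest)
      match pvB_markers R or2.1 or2.2 ["todo ".toList, "to-do ".toList] with
      | .fall =>
        let body := PySem.Chars.strip (PySem.Chars.slice R (some (a.length : Int)) none)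
        match pvB_suffixMarkers body (PySem.Chars.lower body) [" todo list".toList, " to-do list".toList] with
        | .fall => .ret none               -- `return None` of the matched action
        | r => r
      | r => r
    else pvB_actions R low as

def parse_todo_request_py_alt (request_text : String) : Option String :=
  let R := request_text.toList
  let low := PySem.Chars.lower R           -- low = request_text.lower()
  match pvB_actions R low ["add ".toList, "create ".toList] with
  | .ret v => v.map String.ofList
  | .raised => none                        -- ValueError (excluded by Pre_)
  | .fall => none                          -- `return None`

-- ===== PRECONDITION & SPEC =====
-- Pre_ excludes exactly the inputs on which Python raises ValueError("To-do text cannot be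
-- empty."): a matched prefix/suffix whose remaining to-do text strips to the empty string.
def Pre_parse_todo_request_py (request_text : String) : Prop :=
  (∀ p ∈ ["add todo ", "add to-do ", "create todo ", "create to-do ", "add a todo ", "add a to-do ", "create a todo ", "create a to-do "],
     PySem.Chars.startswith (PySem.Chars.lower request_text.toList) p.toList = true →
     PySem.Chars.strip (PySem.Chars.slice request_text.toList (some (p.toList.length : Int)) none) ≠ []) ∧
  (∀ a ∈ ["add ", "create "],
     PySem.Chars.startswith (PySem.Chars.lower request_text.toList) a.toList = true →
     ∀ s ∈ [" to my todo list", " to my to-do list", " on my todo list", " on my to-do list", " to todo list", " to to-do list", " on todo list", " on to-do list"],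
       PySem.Chars.endswith (PySem.Chars.lower (PySem.Chars.strip (PySem.Chars.slice request_text.toList (some (a.toList.length : Int)) none))) s.toList = true →
       PySem.Chars.strip (PySem.Chars.slice (PySem.Chars.strip (PySem.Chars.slice request_text.toList (some (a.toList.length : Int)) none)) none (some (-(s.toList.length : Int)))) ≠ [])

instance (request_text : String) : Decidable (Pre_parse_todo_request_py request_text) := by
  unfold Pre_parse_todo_request_py; infer_instance

def pvWitness_parse_todo_request_py : String := "add todo Buy milk"

def Spec_parse_todo_request_py (request_text : String) (out : Option String) : Prop := out = parse_todo_request_py_alt request_text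
instance (request_text : String) (out : Option String) : Decidable (Spec_parse_todo_request_py request_text out) := by unfold Spec_parse_todo_request_py; infer_instance

-- ===== CLAIM (what is proved, stated in full; the proofs are below) =====
def Claim_equal_parse_todo_request_py : Prop := ∀ (request_text : String), Dom_parse_todo_request_py request_text → Pre_parse_todo_request_py request_text → Spec_parse_todo_request_py request_text (parse_todo_request_py request_text)

-- ===== LEMMAS AND PROOFS =====

lemma pv_append_prefix_iff (p q s : List Char) : p ++ q <+: s ↔ p <+: s ∧ q <+: s.drop p.length := by
  constructor
  · rintro ⟨t, rfl⟩
    refine ⟨⟨q ++ t, by simp⟩, ?_⟩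
    rw [List.append_assoc, List.drop_left]
    exact ⟨t, rfl⟩
  · rintro ⟨⟨t1, rfl⟩, h2⟩
    rw [List.drop_left] at h2
    obtain ⟨t2, rfl⟩ := h2
    exact ⟨t2, by simp⟩

lemma pv_append_suffix_iff (p q s : List Char) : p ++ q <:+ s ↔ q <:+ s ∧ p <:+ s.take (s.length - q.length) := by
  constructor
  · rintro ⟨t, rfl⟩
    rw [← List.append_assoc]
    refine ⟨⟨t ++ p, by simp⟩, ?_⟩
    have h : (t ++ p ++ q).length - q.length = (t ++ p).length := by simp; omega
    rw [h, List.take_left]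
    exact ⟨t, rfl⟩
  · rintro ⟨⟨t1, rfl⟩, h2⟩
    have h : (t1 ++ q).length - q.length = t1.length := by simp
    rw [h, List.take_left] at h2
    obtain ⟨t2, rfl⟩ := h2
    exact ⟨t2, by simp⟩

lemma pv_sw_append (s p q : List Char) :
    PySem.Chars.startswith s (p ++ q) = (PySem.Chars.startswith s p && PySem.Chars.startswith (s.drop p.length) q) := by
  rw [← Bool.coe_iff_coe, Bool.and_eq_true]
  simp only [PySem.Chars.startswith_iff]
  exact pv_append_prefix_iff p q s

lemma pv_ew_append (s p q : List Char) :
    PySem.Chars.endswith s (p ++ q) = (PySem.Chars.endswith s q && PySem.Chars.endswith (s.take (s.length - q.length)) p) := by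
  rw [← Bool.coe_iff_coe, Bool.and_eq_true]
  simp only [PySem.Chars.endswith_iff]
  exact pv_append_suffix_iff p q s

lemma pv_not_prefix_both {x y s : List Char} (hxy : ¬ x <+: y) (hyx : ¬ y <+: x)
    (h1 : x <+: s) (h2 : y <+: s) : False :=
  (List.prefix_or_prefix_of_prefix h1 h2).elim hxy hyx

lemma pv_not_suffix_both {x y s : List Char} (hxy : ¬ x <:+ y) (hyx : ¬ y <:+ x)
    (h1 : x <:+ s) (h2 : y <:+ s) : False :=
  (List.suffix_or_suffix_of_suffix h1 h2).elim hxy hyx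

lemma pv_slice_neg (s : List Char) (m : Nat) (hm : 0 < m) :
    PySem.Chars.slice s none (some (-(m : Int))) = s.take (s.length - m) := by
  simp [PySem.List.slice_to_neg_natCast s m hm]

lemma pv_ew_decomp (lb S C M : List Char) (h : S = C ++ M) :
    PySem.Chars.endswith lb S = (PySem.Chars.endswith lb M && PySem.Chars.endswith (lb.take (lb.length - M.length)) C) := by
  rw [h, pv_ew_append]

lemma pv_slice_slice (body : List Char) (c m s : Nat) (hc : 0 < c) (h : s = c + m) :
    PySem.Chars.slice (body.take (body.length - m)) none (some (-(c : Int))) = body.take (body.length - s) := by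
  rw [pv_slice_neg _ c hc, List.length_take, List.take_take]
  congr 1
  omega

lemma pv_stageS (body lb : List Char) :
    pvA_suffixStage body lb = pvB_suffixMarkers body lb [" todo list".toList, " to-do list".toList] := by
  have d1 := pv_ew_decomp lb (" to my todo list".toList) (" to my".toList) (" todo list".toList) (by decide)
  have d2 := pv_ew_decomp lb (" to my to-do list".toList) (" to my".toList) (" to-do list".toList) (by decide)
  have d3 := pv_ew_decomp lb (" on my todo list".toList) (" on my".toList) (" todo list".toList) (by decide)
  have d4 := pv_ew_decomp lb (" on my to-do list".toList) (" on my".toList) (" to-do list".toList) (by decide)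
  have d5 := pv_ew_decomp lb (" to todo list".toList) (" to".toList) (" todo list".toList) (by decide)
  have d6 := pv_ew_decomp lb (" to to-do list".toList) (" to".toList) (" to-do list".toList) (by decide)
  have d7 := pv_ew_decomp lb (" on todo list".toList) (" on".toList) (" todo list".toList) (by decide)
  have d8 := pv_ew_decomp lb (" on to-do list".toList) (" on".toList) (" to-do list".toList) (by decide)
  simp only [pvA_suffixStage, pvA_suffixes, pvB_suffixMarkers, pvB_connectors]
  rw [pv_slice_neg lb (" todo list".toList.length) (by decide),
      pv_slice_neg lb (" to-do list".toList.length) (by decide),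
      pv_slice_neg body (" todo list".toList.length) (by decide),
      pv_slice_neg body (" to-do list".toList.length) (by decide),
      pv_slice_neg body (" to my todo list".toList.length) (by decide),
      pv_slice_neg body (" to my to-do list".toList.length) (by decide),
      pv_slice_neg body (" on my todo list".toList.length) (by decide),
      pv_slice_neg body (" on my to-do list".toList.length) (by decide),
      pv_slice_neg body (" to todo list".toList.length) (by decide),
      pv_slice_neg body (" to to-do list".toList.length) (by decide),
      pv_slice_neg body (" on todo list".toList.length) (by decide),
      pv_slice_neg body (" on to-do list".toList.length) (by decide)]
  rw [pv_slice_slice body (" to my".toList.length) (" todo list".toList.length) (" to my todo list".toList.length) (by decide) (by decide),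
      pv_slice_slice body (" on my".toList.length) (" todo list".toList.length) (" on my todo list".toList.length) (by decide) (by decide),
      pv_slice_slice body (" to".toList.length) (" todo list".toList.length) (" to todo list".toList.length) (by decide) (by decide),
      pv_slice_slice body (" on".toList.length) (" todo list".toList.length) (" on todo list".toList.length) (by decide) (by decide),
      pv_slice_slice body (" to my".toList.length) (" to-do list".toList.length) (" to my to-do list".toList.length) (by decide) (by decide),
      pv_slice_slice body (" on my".toList.length) (" to-do list".toList.length) (" on my to-do list".toList.length) (by decide) (by decide),
      pv_slice_slice body (" to".toList.length) (" to-do list".toList.length) (" to to-do list".toList.length) (by decide) (by decide),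
      pv_slice_slice body (" on".toList.length) (" to-do list".toList.length) (" on to-do list".toList.length) (by decide) (by decide)]
  rw [d1, d2, d3, d4, d5, d6, d7, d8]
  cases hb1 : PySem.Chars.endswith lb (" todo list".toList)
  · cases hb2 : PySem.Chars.endswith lb (" to-do list".toList)
    · simp
    · simp only [Bool.false_and, Bool.true_and, Bool.false_eq_true, if_false]
      split_ifs <;> rfl
  · cases hb2 : PySem.Chars.endswith lb (" to-do list".toList)
    · simp only [Bool.false_and, Bool.true_and, Bool.false_eq_true, if_false]
      split_ifs <;> rfl
    · exact absurd (pv_not_suffix_both (by decide) (by decide)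
        ((PySem.Chars.endswith_iff _ _).mp hb1) ((PySem.Chars.endswith_iff _ _).mp hb2)) not_false


lemma pv_slice_from (s : List Char) (n : Nat) : PySem.Chars.slice s (some (n : Int)) none = s.drop n := by
  simp [PySem.List.slice_from_natCast]

lemma pv_slice_two (s : List Char) : PySem.Chars.slice s (some 2) none = s.drop 2 := by
  simpa using pv_slice_from s 2

lemma pv_sw_decomp (low P A M : List Char) (h : P = A ++ M) :
    PySem.Chars.startswith low P = (PySem.Chars.startswith low A && PySem.Chars.startswith (low.drop A.length) M) := by
  rw [h, pv_sw_append]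

lemma pv_sw_excl {x y : List Char} (hxy : ¬ x <+: y) (hyx : ¬ y <+: x) {r : List Char}
    (h : PySem.Chars.startswith r x = true) : PySem.Chars.startswith r y = false := by
  cases hy : PySem.Chars.startswith r y
  · rfl
  · exact absurd (pv_not_prefix_both hxy hyx ((PySem.Chars.startswith_iff _ _).mp h)
      ((PySem.Chars.startswith_iff _ _).mp hy)) not_false

-- ===== VERDICT (by name: the statement is the Claim_ definition above) =====
set_option maxHeartbeats 1600000 in
theorem parse_todo_request_py_spec : Claim_equal_parse_todo_request_py := by
  intro rt hdom hpre
  unfold Spec_parse_todo_request_py parse_todo_request_py parse_todo_request_py_alt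
  simp only [pvA_prefixes, pvA_actions, pvB_actions, pvB_markers]
  rw [pv_sw_decomp (PySem.Chars.lower rt.toList) ("add todo ".toList) ("add ".toList) ("todo ".toList) (by decide),
      pv_sw_decomp (PySem.Chars.lower rt.toList) ("add to-do ".toList) ("add ".toList) ("to-do ".toList) (by decide),
      pv_sw_decomp (PySem.Chars.lower rt.toList) ("create todo ".toList) ("create ".toList) ("todo ".toList) (by decide),
      pv_sw_decomp (PySem.Chars.lower rt.toList) ("create to-do ".toList) ("create ".toList) ("to-do ".toList) (by decide),
      pv_sw_decomp (PySem.Chars.lower rt.toList) ("add a todo ".toList) ("add ".toList) ("a todo ".toList) (by decide),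
      pv_sw_decomp (PySem.Chars.lower rt.toList) ("add a to-do ".toList) ("add ".toList) ("a to-do ".toList) (by decide),
      pv_sw_decomp (PySem.Chars.lower rt.toList) ("create a todo ".toList) ("create ".toList) ("a todo ".toList) (by decide),
      pv_sw_decomp (PySem.Chars.lower rt.toList) ("create a to-do ".toList) ("create ".toList) ("a to-do ".toList) (by decide)]
  rw [pv_sw_decomp ((PySem.Chars.lower rt.toList).drop ("add ".toList.length)) ("a todo ".toList) ("a ".toList) ("todo ".toList) (by decide),
      pv_sw_decomp ((PySem.Chars.lower rt.toList).drop ("add ".toList.length)) ("a to-do ".toList) ("a ".toList) ("to-do ".toList) (by decide),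
      pv_sw_decomp ((PySem.Chars.lower rt.toList).drop ("create ".toList.length)) ("a todo ".toList) ("a ".toList) ("todo ".toList) (by decide),
      pv_sw_decomp ((PySem.Chars.lower rt.toList).drop ("create ".toList.length)) ("a to-do ".toList) ("a ".toList) ("to-do ".toList) (by decide),
      show ("a ".toList.length) = 2 from by decide]
  simp only [pv_slice_from, pv_slice_two]
  cases ha : PySem.Chars.startswith (PySem.Chars.lower rt.toList) ("add ".toList)
  · cases hc : PySem.Chars.startswith (PySem.Chars.lower rt.toList) ("create ".toList)
    · simp
    ·
      simp only [Bool.false_and, Bool.true_and, Bool.false_eq_true, if_false, if_true]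
      cases hA : PySem.Chars.startswith (List.drop "create ".toList.length (PySem.Chars.lower rt.toList)) ("a ".toList)
      · simp only [Bool.false_and, Bool.true_and, Bool.false_eq_true, if_false, if_true]
        rw [show ((↑"create ".toList.length + ↑"todo ".toList.length : Int)) = (("create todo ".toList.length : Int)) from by decide,
            show ((↑"create ".toList.length + ↑"to-do ".toList.length : Int)) = (("create to-do ".toList.length : Int)) from by decide]
        simp only [pv_slice_from]
        cases hm1 : PySem.Chars.startswith (List.drop "create ".toList.length (PySem.Chars.lower rt.toList)) ("todo ".toList)
        · cases hm2 : PySem.Chars.startswith (List.drop "create ".toList.length (PySem.Chars.lower rt.toList)) ("to-do ".toList)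
          · simp only [Bool.false_eq_true, if_false]
            rw [pv_stageS]
            cases hres : pvB_suffixMarkers (PySem.Chars.strip (List.drop "create ".toList.length rt.toList))
              (PySem.Chars.lower (PySem.Chars.strip (List.drop "create ".toList.length rt.toList)))
              [" todo list".toList, " to-do list".toList] <;> rfl
          · split_ifs <;> first | contradiction | (exact absurd rfl (by assumption)) | rfl
        · split_ifs <;> first | contradiction | (exact absurd rfl (by assumption)) | rfl
      · rw [pv_sw_excl (x := "a ".toList) (y := "todo ".toList) (by decide) (by decide) hA,
            pv_sw_excl (x := "a ".toList) (y := "to-do ".toList) (by decide) (by decide) hA]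
        simp only [Bool.false_and, Bool.true_and, Bool.false_eq_true, if_false, if_true]
        rw [show ((↑"create ".toList.length + 2 + ↑"todo ".toList.length : Int)) = (("create a todo ".toList.length : Int)) from by decide,
            show ((↑"create ".toList.length + 2 + ↑"to-do ".toList.length : Int)) = (("create a to-do ".toList.length : Int)) from by decide]
        simp only [pv_slice_from]
        cases hm1 : PySem.Chars.startswith (List.drop 2 (List.drop "create ".toList.length (PySem.Chars.lower rt.toList))) ("todo ".toList)
        · cases hm2 : PySem.Chars.startswith (List.drop 2 (List.drop "create ".toList.length (PySem.Chars.lower rt.toList))) ("to-do ".toList)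
          · simp only [Bool.false_eq_true, if_false]
            rw [pv_stageS]
            cases hres : pvB_suffixMarkers (PySem.Chars.strip (List.drop "create ".toList.length rt.toList))
              (PySem.Chars.lower (PySem.Chars.strip (List.drop "create ".toList.length rt.toList)))
              [" todo list".toList, " to-do list".toList] <;> rfl
          · split_ifs <;> first | contradiction | (exact absurd rfl (by assumption)) | rfl
        · split_ifs <;> first | contradiction | (exact absurd rfl (by assumption)) | rfl
  · cases hc : PySem.Chars.startswith (PySem.Chars.lower rt.toList) ("create ".toList)
    ·
      simp only [Bool.false_and, Bool.true_and, Bool.false_eq_true, if_false, if_true]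
      cases hA : PySem.Chars.startswith (List.drop "add ".toList.length (PySem.Chars.lower rt.toList)) ("a ".toList)
      · simp only [Bool.false_and, Bool.true_and, Bool.false_eq_true, if_false, if_true]
        rw [show ((↑"add ".toList.length + ↑"todo ".toList.length : Int)) = (("add todo ".toList.length : Int)) from by decide,
            show ((↑"add ".toList.length + ↑"to-do ".toList.length : Int)) = (("add to-do ".toList.length : Int)) from by decide]
        simp only [pv_slice_from]
        cases hm1 : PySem.Chars.startswith (List.drop "add ".toList.length (PySem.Chars.lower rt.toList)) ("todo ".toList)
        · cases hm2 : PySem.Chars.startswith (List.drop "add ".toList.length (PySem.Chars.lower rt.toList)) ("to-do ".toList)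
          · simp only [Bool.false_eq_true, if_false]
            rw [pv_stageS]
            cases hres : pvB_suffixMarkers (PySem.Chars.strip (List.drop "add ".toList.length rt.toList))
              (PySem.Chars.lower (PySem.Chars.strip (List.drop "add ".toList.length rt.toList)))
              [" todo list".toList, " to-do list".toList] <;> rfl
          · split_ifs <;> first | contradiction | (exact absurd rfl (by assumption)) | rfl
        · split_ifs <;> first | contradiction | (exact absurd rfl (by assumption)) | rfl
      · rw [pv_sw_excl (x := "a ".toList) (y := "todo ".toList) (by decide) (by decide) hA,
            pv_sw_excl (x := "a ".toList) (y := "to-do ".toList) (by decide) (by decide) hA]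
        simp only [Bool.false_and, Bool.true_and, Bool.false_eq_true, if_false, if_true]
        rw [show ((↑"add ".toList.length + 2 + ↑"todo ".toList.length : Int)) = (("add a todo ".toList.length : Int)) from by decide,
            show ((↑"add ".toList.length + 2 + ↑"to-do ".toList.length : Int)) = (("add a to-do ".toList.length : Int)) from by decide]
        simp only [pv_slice_from]
        cases hm1 : PySem.Chars.startswith (List.drop 2 (List.drop "add ".toList.length (PySem.Chars.lower rt.toList))) ("todo ".toList)
        · cases hm2 : PySem.Chars.startswith (List.drop 2 (List.drop "add ".toList.length (PySem.Chars.lower rt.toList))) ("to-do ".toList)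
          · simp only [Bool.false_eq_true, if_false]
            rw [pv_stageS]
            cases hres : pvB_suffixMarkers (PySem.Chars.strip (List.drop "add ".toList.length rt.toList))
              (PySem.Chars.lower (PySem.Chars.strip (List.drop "add ".toList.length rt.toList)))
              [" todo list".toList, " to-do list".toList] <;> rfl
          · split_ifs <;> first | contradiction | (exact absurd rfl (by assumption)) | rfl
        · split_ifs <;> first | contradiction | (exact absurd rfl (by assumption)) | rfl
    · exact absurd (pv_not_prefix_both (by decide) (by decide) ((PySem.Chars.startswith_iff _ _).mp ha)
        ((PySem.Chars.startswith_iff _ _).mp hc)) not_false
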